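-- pv_equiv track=rewrite | github.com/LordMhri/python-practices | sameEnd.py | sameEnd
-- ===== SOURCE A (Python) =====
-- from collections import Counter
--
-- def sameEnd(s):
--     freq = Counter()
--     ans = []
--     _sum = 0
--     for i in range(len(s)):
--         freq[s[i]] += 1
--         _sum += freq[s[i]]
--         ans.append(_sum)
--
--     return ans
-- ===== SOURCE B (Python) =====
-- from collections import Counter
--
-- def sameEnd(s):
--     # Count the whole string once; the final running sum equals the number of
--     # equal-letter pairs (j <= k), i.e. sum of m*(m+1)/2 over letter counts.
--     # Build the answer back-to-front by peeling the last character off: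
--     # removing one occurrence of c lowers the pair total by its current count.
--     freq = Counter(s)
--     total = sum(m * (m + 1) // 2 for m in freq.values())
--     ans = []
--     for c in reversed(s):
--         ans.append(total)
--         total -= freq[c]
--         freq[c] -= 1
--     ans.reverse()
--     return ans
-- ===== Notes on version B (the rewrite author's own statement) =====
-- stated objective: alternative
-- what changed: Instead of A's forward pass with a running counter and running sum, B counts the whole string once, computes the grand total in closed form as the sum of m*(m+1)//2 over the letter counts, and builds the output back-to-front by peeling each last character off while subtracting its current count.
import Mathlib
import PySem

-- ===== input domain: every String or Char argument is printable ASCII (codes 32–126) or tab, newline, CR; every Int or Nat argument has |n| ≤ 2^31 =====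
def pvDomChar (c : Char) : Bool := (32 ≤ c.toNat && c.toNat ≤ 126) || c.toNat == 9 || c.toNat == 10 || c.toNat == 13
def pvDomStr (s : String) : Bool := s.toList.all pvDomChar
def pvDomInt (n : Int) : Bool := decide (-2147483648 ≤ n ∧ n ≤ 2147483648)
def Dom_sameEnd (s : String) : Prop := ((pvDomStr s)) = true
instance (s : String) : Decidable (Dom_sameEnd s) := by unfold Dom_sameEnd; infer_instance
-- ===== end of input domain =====

-- B replaces A's single forward pass (running counter + running sum) with a closed-form
-- grand total (sum of m*(m+1)//2 over the whole-string Counter) peeled backwards: the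
-- output is built back-to-front by subtracting the current count of each last character.


-- ===== PORT A =====
-- A's single loop state (freq, _sum, ans): freq[s[i]] += 1; _sum += freq[s[i]]; ans.append(_sum)
def sameEnd (s : String) : List Int :=
  (s.toList.foldl
    (fun st c =>
      let d := st.1.modify c 0 (· + 1)
      let f := d.getD c 0
      (d, st.2.1 + f, st.2.2 ++ [st.2.1 + f]))
    ((PySem.Dict.empty : PySem.Dict Char Int), (0 : Int), ([] : List Int))).2.2

-- ===== PORT B =====
-- freq = Counter(s); total = sum(m*(m+1)//2 for m in freq.values());
-- for c in reversed(s): ans.append(total); total -= freq[c]; freq[c] -= 1;  ans.reverse()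
def sameEnd_alt (s : String) : List Int :=
  let freq := PySem.Dict.counter s.toList
  let total : Int := (freq.values.map (fun m => PySem.Int.floordiv (m * (m + 1)) 2)).sum
  ((s.toList.reverse.foldl
    (fun st c =>
      (st.1.modify c 0 (· - 1), st.2.1 - st.1.getD c 0, st.2.2 ++ [st.2.1]))
    (freq, total, ([] : List Int))).2.2).reverse

-- ===== PRECONDITION & SPEC =====
def Spec_sameEnd (s : String) (out : List Int) : Prop := out = sameEnd_alt s
instance (s : String) (out : List Int) : Decidable (Spec_sameEnd s out) := by unfold Spec_sameEnd; infer_instance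

-- ===== CLAIM (what is proved, stated in full; the proofs are below) =====
def Claim_equal_sameEnd : Prop := ∀ (s : String), Dom_sameEnd s → Spec_sameEnd s (sameEnd s)

-- ===== LEMMAS AND PROOFS =====

-- triangular number m*(m+1)//2, as B computes it
def triOf (m : Int) : Int := PySem.Int.floordiv (m * (m + 1)) 2

-- total number of equal-letter pairs (j ≤ k) in l, as a sum over the distinct letters
def pairT (l : List Char) : Int :=
  ((PySem.Set.ofList l).map (fun c => triOf ((l.count c : Nat) : Int))).sum

-- the common reference output: pair totals of all nonempty prefixes
def prefT (l : List Char) : List Int :=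
  (List.range l.length).map (fun i => pairT (l.take (i + 1)))

theorem triOf_natCast (n : ℕ) : triOf ((n : Int)) = ((n * (n + 1) / 2 : Nat) : Int) := by
  unfold triOf
  have : ((n : Int)) * ((n : Int) + 1) = ((n * (n + 1) : Nat) : Int) := by push_cast; ring
  rw [this]
  exact_mod_cast PySem.Int.floordiv_natCast (n * (n + 1)) 2

theorem triOf_succ (n : ℕ) : triOf (((n : Int)) + 1) = triOf ((n : Int)) + ((n : Int) + 1) := by
  have h1 : ((n : Int)) + 1 = ((n + 1 : Nat) : Int) := by push_cast; ring
  rw [h1, triOf_natCast, triOf_natCast]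
  have h2 : (n + 1) * (n + 1 + 1) / 2 = n * (n + 1) / 2 + (n + 1) := by
    have : (n + 1) * (n + 1 + 1) = n * (n + 1) + (n + 1) * 2 := by ring
    rw [this, Nat.add_mul_div_right _ _ (by norm_num : 0 < 2)]
  rw [h2]; push_cast; ring

theorem count_append_singleton (l : List Char) (c x : Char) :
    ((l ++ [c]).count x : Nat) = l.count x + (if x = c then 1 else 0) := by
  by_cases h : x = c
  · subst h; simp [List.count_append]
  · simp [List.count_append, h, Ne.symm h]

theorem ofList_append_singleton (l : List Char) (c : Char) :
    PySem.Set.ofList (l ++ [c]) = PySem.Set.add (PySem.Set.ofList l) c := by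
  rw [PySem.Set.ofList_eq_foldl, PySem.Set.ofList_eq_foldl, List.foldl_append]
  rfl

theorem pairT_snoc (l : List Char) (c : Char) :
    pairT (l ++ [c]) = pairT l + ((l.count c : Nat) + 1) := by
  unfold pairT
  rw [ofList_append_singleton]
  by_cases hc : c ∈ l
  · -- c already occurs: the set is unchanged, only the term at c grows
    have hcs : c ∈ PySem.Set.ofList l := (PySem.Set.mem_ofList l c).mpr hc
    have hadd : PySem.Set.add (PySem.Set.ofList l) c = PySem.Set.ofList l := by
      unfold PySem.Set.add
      simp [PySem.Set.contains, hcs]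
    rw [hadd]
    have hnd : (PySem.Set.ofList l).Nodup := PySem.Set.nodup_ofList l
    obtain ⟨s₁, s₂, hsplit⟩ := List.append_of_mem hcs
    rw [hsplit] at hnd ⊢
    rw [List.nodup_append] at hnd
    obtain ⟨hnd1, hnd2, hdisj⟩ := hnd
    have hc1 : c ∉ s₁ := fun h => (hdisj c h c (by simp)) rfl
    have hc2 : c ∉ s₂ := (List.nodup_cons.mp hnd2).1
    simp only [List.map_append, List.map_cons, List.sum_append, List.sum_cons]
    have hterm1 : ∀ x ∈ s₁, triOf (((l ++ [c]).count x : Nat) : Int) = triOf ((l.count x : Nat) : Int) := by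
      intro x hx
      have hxc : x ≠ c := fun h => hc1 (h ▸ hx)
      rw [count_append_singleton]; simp [hxc]
    have hterm2 : ∀ x ∈ s₂, triOf (((l ++ [c]).count x : Nat) : Int) = triOf ((l.count x : Nat) : Int) := by
      intro x hx
      have hxc : x ≠ c := fun h => hc2 (h ▸ hx)
      rw [count_append_singleton]; simp [hxc]
    rw [List.map_congr_left hterm1, List.map_congr_left hterm2]
    have hcterm : triOf (((l ++ [c]).count c : Nat) : Int) = triOf ((l.count c : Nat) : Int) + ((l.count c : Nat) + 1) := by
      rw [count_append_singleton]
      simp only [if_pos (rfl : c = c)]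
      exact_mod_cast triOf_succ (l.count c)
    rw [hcterm]; push_cast; ring
  · -- c is new: the set gains c, old terms are unchanged, the new term is 1
    have hcs : c ∉ PySem.Set.ofList l := fun h => hc ((PySem.Set.mem_ofList l c).mp h)
    have hadd : PySem.Set.add (PySem.Set.ofList l) c = PySem.Set.ofList l ++ [c] := by
      unfold PySem.Set.add
      simp [PySem.Set.contains, hcs]
    rw [hadd]
    simp only [List.map_append, List.map_cons, List.map_nil, List.sum_append, List.sum_cons, List.sum_nil]
    have hterm : ∀ x ∈ PySem.Set.ofList l, triOf (((l ++ [c]).count x : Nat) : Int) = triOf ((l.count x : Nat) : Int) := by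
      intro x hx
      have hxc : x ≠ c := fun h => hc (h ▸ ((PySem.Set.mem_ofList l x).mp hx))
      rw [count_append_singleton]; simp [hxc]
    rw [List.map_congr_left hterm]
    have hc0 : l.count c = 0 := List.count_eq_zero.mpr hc
    have : ((l ++ [c]).count c : Nat) = 1 := by rw [count_append_singleton]; simp [hc0]
    rw [this, hc0]
    have h1 : triOf ((1 : Int)) = 1 := by decide
    simp [h1]

theorem prefT_snoc (l : List Char) (c : Char) :
    prefT (l ++ [c]) = prefT l ++ [pairT (l ++ [c])] := by
  unfold prefT
  simp only [List.length_append, List.length_singleton, List.range_succ, List.map_append, List.map_cons, List.map_nil]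
  congr 1
  · apply List.map_congr_left
    intro i hi
    have : i + 1 ≤ l.length := List.mem_range.mp hi
    rw [List.take_append_of_le_length this]
  · have h : List.take (l.length + 1) (l ++ [c]) = l ++ [c] :=
      List.take_of_length_le (by simp)
    rw [h]

-- A's loop step
def stepA (st : PySem.Dict Char Int × Int × List Int) (c : Char) : PySem.Dict Char Int × Int × List Int :=
  let d := st.1.modify c 0 (· + 1)
  let f := d.getD c 0
  (d, st.2.1 + f, st.2.2 ++ [st.2.1 + f])

theorem counter_snoc (l : List Char) (c : Char) :
    PySem.Dict.counter (l ++ [c]) = (PySem.Dict.counter l).modify c 0 (· + 1) := by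
  rw [PySem.Dict.counter_eq_foldl, PySem.Dict.counter_eq_foldl, List.foldl_append]
  rfl

-- A's state after processing l: the counter of l, the pair total of l, the prefix totals of l
theorem stateA_char (l : List Char) :
    l.foldl stepA ((PySem.Dict.empty : PySem.Dict Char Int), (0 : Int), ([] : List Int))
      = (PySem.Dict.counter l, pairT l, prefT l) := by
  induction l using List.reverseRecOn with
  | nil => rfl
  | append_singleton l c ih =>
    rw [List.foldl_append, ih]
    simp only [List.foldl_cons, List.foldl_nil]
    unfold stepA
    rw [← counter_snoc]
    have hf : (PySem.Dict.counter (l ++ [c])).getD c 0 = ((l.count c : Nat) : Int) + 1 := by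
      rw [PySem.Dict.getD_counter]
      rw [count_append_singleton]; simp
    simp only [hf]
    rw [pairT_snoc, prefT_snoc, pairT_snoc]

-- B's peel loop, abstracted over any dict that getD-represents the counts of l
theorem peel_char (l : List Char) :
    ∀ (d : PySem.Dict Char Int), (∀ x, d.getD x 0 = ((l.count x : Nat) : Int)) →
    ∀ (ans : List Int),
      (l.reverse.foldl
        (fun st c => (st.1.modify c 0 (· - 1), st.2.1 - st.1.getD c 0, st.2.2 ++ [st.2.1]))
        (d, pairT l, ans)).2.2 = ans ++ (prefT l).reverse := by
  induction l using List.reverseRecOn with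
  | nil => intro d _ ans; simp [prefT]
  | append_singleton l c ih =>
    intro d hd ans
    rw [List.reverse_append, List.reverse_singleton, List.singleton_append, List.foldl_cons]
    have hdc : d.getD c 0 = ((l.count c : Nat) : Int) + 1 := by
      rw [hd c, count_append_singleton]; simp
    have hd' : ∀ x, (d.modify c 0 (· - 1)).getD x 0 = ((l.count x : Nat) : Int) := by
      intro x
      rw [PySem.Dict.getD_modify]
      by_cases hx : x = c
      · subst hx; simp [hdc]
      · simp only [if_neg hx]
        rw [hd x, count_append_singleton]; simp [hx]
    have htot : pairT (l ++ [c]) - d.getD c 0 = pairT l := by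
      rw [hdc, pairT_snoc]; ring
    rw [htot]
    rw [ih (d.modify c 0 (· - 1)) hd' (ans ++ [pairT (l ++ [c])])]
    rw [prefT_snoc, List.reverse_append, List.reverse_singleton, List.singleton_append,
      List.append_assoc, List.singleton_append]

theorem counter_values_tri (l : List Char) :
    (((PySem.Dict.counter l).values).map (fun m => PySem.Int.floordiv (m * (m + 1)) 2)).sum = pairT l := by
  rw [PySem.Dict.values_eq_map_keys (PySem.Dict.counter l) (PySem.Dict.nodup_keys_counter l) 0]
  rw [PySem.Dict.keys_counter, List.map_map]
  unfold pairT
  congr 1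
  apply List.map_congr_left
  intro x _
  simp [Function.comp, PySem.Dict.getD_counter, triOf]

-- ===== VERDICT (by name: the statement is the Claim_ definition above) =====
theorem sameEnd_spec : Claim_equal_sameEnd := by
  intro s _
  unfold Spec_sameEnd sameEnd sameEnd_alt
  show (s.toList.foldl stepA _).2.2 = _
  rw [stateA_char s.toList]
  simp only []
  rw [counter_values_tri s.toList]
  rw [peel_char s.toList (PySem.Dict.counter s.toList)
      (fun x => PySem.Dict.getD_counter s.toList x) []]
  simp
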